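-- pv_equiv track=rewrite | github.com/S0jer/algorithms-and-data-structures-course-2021 | Powtórka/13. Dobry_poczatek.py | the_good_start
-- ===== SOURCE A (Python) =====
-- def the_good_start(G):
--     dp = DFS_TpK(G)
--
--     s = dp[0]
--
--     v = DFS_K(G, s)
--
--     for i in v:
--         if i == -1:
--             return False
--
--     return True
--
-- def DFS_K(G, s):
--     n = len(G)
--     v = [-1] * n
--     v_p = [-1] * n
--
--     DFSVisit_K(G, s, v, v_p)
--
--     return v
--
-- def DFSVisit_K(G, u, v, v_p):
--     v[u] = 1
--
--     for i in G[u]: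
--         if v[i] != 1:
--             v_p[i] = u
--             DFSVisit_K(G, i, v, v_p)
--
-- def DFS_TpK(G):
--     n = len(G)
--     v = [-1] * n
--     delete = []
--
--     i = 0
--     while i != n:
--         delete, v = DFSVisit_TpK(G, i, v, delete)
--         while i != n and v[i] != -1:
--             i += 1
--
--     return delete[::-1]
--
-- def DFSVisit_TpK(G, u, v, delete):
--     v[u] = 1
--
--     for i in G[u]:
--         if v[i] != 1:
--             DFSVisit_TpK(G, i, v, delete)
--
--     delete.append(u)
--
--     return delete, v
-- ===== SOURCE B (Python) =====
-- def the_good_start(G):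
--     n = len(G)
--
--     # Pass 1: find the root of the LAST restart of a DFS sweep that restarts
--     # from increasing unvisited indices (= the vertex that finishes last in
--     # A's topological pass), using an explicit stack instead of recursion and
--     # without building the finish-order list at all.
--     seen = [False] * n
--     s = 0
--     for i in range(n):
--         if not seen[i]:
--             s = i
--             stack = [i]
--             while stack:
--                 u = stack.pop()
--                 if not seen[u]:
--                     seen[u] = True
--                     stack.extend(reversed(G[u]))
--
--     # Pass 2: iterative flood fill from s; all vertices reachable?
--     reach = [False] * n
--     stack = [s]
--     while stack:
--         u = stack.pop()
--         if not reach[u]: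
--             reach[u] = True
--             stack.extend(reversed(G[u]))
--
--     return all(reach)
-- ===== Notes on version B (the rewrite author's own statement) =====
-- stated objective: alternative
-- what changed: B replaces both recursive DFS passes by iterative explicit-stack flood fills and eliminates the finish-order list entirely: the topological start vertex is obtained as the root of the last restart of the increasing-index sweep (tracked in a single variable) instead of reversing a post-order list, and the final check counts reachability with a boolean array and all().
-- outside the precondition, e.g. on the_good_start([]): A raises IndexError, B raises IndexError
import Mathlib
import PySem

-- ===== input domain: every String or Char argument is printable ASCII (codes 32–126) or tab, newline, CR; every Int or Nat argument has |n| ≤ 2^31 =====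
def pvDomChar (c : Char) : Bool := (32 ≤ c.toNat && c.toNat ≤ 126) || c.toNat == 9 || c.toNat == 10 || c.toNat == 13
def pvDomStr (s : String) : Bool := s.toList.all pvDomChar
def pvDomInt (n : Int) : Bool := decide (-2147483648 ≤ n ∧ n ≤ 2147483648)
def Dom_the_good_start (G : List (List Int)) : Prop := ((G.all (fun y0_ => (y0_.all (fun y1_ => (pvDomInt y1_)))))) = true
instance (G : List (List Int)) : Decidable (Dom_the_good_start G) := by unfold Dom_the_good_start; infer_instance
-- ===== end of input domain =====

-- B replaces A's two recursive DFS passes by iterative explicit-stack flood fills, tracking only the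
-- last restart root instead of building and reversing the finish-order list (alternative decomposition).


-- ===== PORT A =====
-- DFSVisit_TpK: recursive post-order visit; fuel bounds recursion depth (one unit per marking;
-- fuel n is always enough under Pre_, so the 0-fuel branch is never reached on admitted inputs).
mutual
def pvVisitTpK (G : List (List Int)) (f : Nat) (u : Int) (v d : List Int) : List Int × List Int :=
  match f with
  | 0 => (d, v)
  | f' + 1 =>
    let r := pvLoopTpK G f' (PySem.List.pyGetD G u []) (PySem.List.pySetD v u 1) d
    (r.1 ++ [u], r.2)
termination_by (f, 0)

def pvLoopTpK (G : List (List Int)) (f : Nat) (l : List Int) (v d : List Int) : List Int × List Int :=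
  match l with
  | [] => (d, v)
  | i :: rest =>
    if PySem.List.pyGetD v i 0 ≠ 1 then
      let r := pvVisitTpK G f i v d
      pvLoopTpK G f rest r.2 r.1
    else pvLoopTpK G f rest v d
termination_by (f, l.length + 1)
end

-- inner 'while i != n and v[i] != -1: i += 1' of DFS_TpK (fuel n - i suffices)
def pvAdvTpK (n : Nat) (v : List Int) (g : Nat) (i : Nat) : Nat :=
  match g with
  | 0 => i
  | g' + 1 =>
    if i ≠ n ∧ PySem.List.pyGetD v (i : Int) 0 ≠ -1 then pvAdvTpK n v g' (i + 1) else i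

-- outer 'while i != n' of DFS_TpK (i strictly increases, so fuel n + 1 suffices)
def pvOuterTpK (G : List (List Int)) (n : Nat) (g : Nat) (i : Nat) (v d : List Int) :
    List Int × List Int :=
  match g with
  | 0 => (d, v)
  | g' + 1 =>
    if i = n then (d, v)
    else
      let r := pvVisitTpK G n (i : Int) v d
      pvOuterTpK G n g' (pvAdvTpK n r.2 (n - i) i) r.2 r.1

def pvDfsTpK (G : List (List Int)) : List Int :=
  let n := G.length
  let r := pvOuterTpK G n (n + 1) 0 (List.replicate n (-1)) []
  r.1.reverse

-- DFSVisit_K (carries the parent list v_p exactly as A does, though it is never read)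
mutual
def pvVisitK (G : List (List Int)) (f : Nat) (u : Int) (v p : List Int) : List Int × List Int :=
  match f with
  | 0 => (v, p)
  | f' + 1 => pvLoopK G f' u (PySem.List.pyGetD G u []) (PySem.List.pySetD v u 1) p
termination_by (f, 0)

def pvLoopK (G : List (List Int)) (f : Nat) (u : Int) (l : List Int) (v p : List Int) :
    List Int × List Int :=
  match l with
  | [] => (v, p)
  | i :: rest =>
    if PySem.List.pyGetD v i 0 ≠ 1 then
      let r := pvVisitK G f i v (PySem.List.pySetD p i u)
      pvLoopK G f u rest r.1 r.2
    else pvLoopK G f u rest v p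
termination_by (f, l.length + 1)
end

def pvDfsK (G : List (List Int)) (s : Int) : List Int :=
  let n := G.length
  (pvVisitK G n s (List.replicate n (-1)) (List.replicate n (-1))).1

def the_good_start (G : List (List Int)) : Bool :=
  let dp := pvDfsTpK G
  let s := PySem.List.pyGetD dp 0 0
  let v := pvDfsK G s
  v.all (fun i => !(i == -1))

-- ===== PORT B =====
-- iterative flood fill: 'while stack: u = stack.pop(); if not seen[u]: seen[u] = True;
-- stack.extend(reversed(G[u]))' — head of the list is the top of the stack, so push = prepend G[u];
-- fuel is consumed once per marking (fuel n is always enough under Pre_).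
def pvFillB (G : List (List Int)) (f : Nat) (st : List Int) (seen : List Bool) : List Bool :=
  match st with
  | [] => seen
  | u :: rest =>
    if PySem.List.pyGetD seen u false then pvFillB G f rest seen
    else
      match f with
      | 0 => seen
      | f' + 1 => pvFillB G f' (PySem.List.pyGetD G u [] ++ rest) (PySem.List.pySetD seen u true)
termination_by (f, st.length)

-- 'for i in range(n): if not seen[i]: s = i; <flood fill from i>'
def pvLoopRootB (G : List (List Int)) (l : List Nat) (s : Int) (seen : List Bool) :
    Int × List Bool :=
  match l with
  | [] => (s, seen)
  | i :: rest =>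
    if PySem.List.pyGetD seen (i : Int) false then pvLoopRootB G rest s seen
    else pvLoopRootB G rest (i : Int) (pvFillB G G.length [(i : Int)] seen)

def the_good_start_alt (G : List (List Int)) : Bool :=
  let n := G.length
  let r := pvLoopRootB G (List.range n) 0 (List.replicate n false)
  let reach := pvFillB G n [r.1] (List.replicate n false)
  reach.all id

-- ===== PRECONDITION & SPEC =====
-- Pre_ excludes exactly the inputs where A raises: G = [] (IndexError on dp[0]) and graphs with an
-- edge outside [-len(G), len(G)) (IndexError on v[i]); B raises on exactly the same inputs.
def Pre_the_good_start (G : List (List Int)) : Prop :=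
  G ≠ [] ∧ ∀ row ∈ G, ∀ e ∈ row, PySem.Raise.InRange G.length e
instance (G : List (List Int)) : Decidable (Pre_the_good_start G) := by
  unfold Pre_the_good_start; infer_instance

def pvWitness_the_good_start : List (List Int) := [[0, 1], [0]]

def Spec_the_good_start (G : List (List Int)) (out : Bool) : Prop := out = the_good_start_alt G
instance (G : List (List Int)) (out : Bool) : Decidable (Spec_the_good_start G out) := by
  unfold Spec_the_good_start; infer_instance

-- ===== CLAIM (what is proved, stated in full; the proofs are below) =====
def Claim_equal_the_good_start : Prop :=
  ∀ (G : List (List Int)), Dom_the_good_start G → Pre_the_good_start G →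
    Spec_the_good_start G (the_good_start G)

-- ===== LEMMAS AND PROOFS =====

-- index bookkeeping ---------------------------------------------------------
theorem pvIdx_lt {n : Nat} {i : Int} {k : Nat} (h : PySem.List.pyIdx? n i = some k) : k < n := by
  unfold PySem.List.pyIdx? at h
  split_ifs at h <;> simp_all <;> omega

theorem pvIdx_some {n : Nat} {i : Int} (h : PySem.Raise.InRange n i) :
    ∃ k, PySem.List.pyIdx? n i = some k := by
  obtain ⟨h1, h2⟩ := h
  unfold PySem.List.pyIdx?
  split_ifs <;> simp_all

theorem pvGetD_k {α : Type} (xs : List α) (i : Int) (d : α) (k : Nat)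
    (h : PySem.List.pyIdx? xs.length i = some k) : PySem.List.pyGetD xs i d = xs.getD k d := by
  simp [PySem.List.pyGetD, PySem.List.pyGet?, h, List.getD_eq_getElem?_getD]

theorem pvSetD_k {α : Type} (xs : List α) (i : Int) (v : α) (k : Nat)
    (h : PySem.List.pyIdx? xs.length i = some k) : PySem.List.pySetD xs i v = xs.set k v := by
  simp [PySem.List.pySetD, PySem.List.pySet?, h]

theorem pvGetD_none {α : Type} (xs : List α) (i : Int) (d : α)
    (h : PySem.List.pyIdx? xs.length i = none) : PySem.List.pyGetD xs i d = d := by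
  simp [PySem.List.pyGetD, PySem.List.pyGet?, h]

theorem pvSetD_none {α : Type} (xs : List α) (i : Int) (v : α)
    (h : PySem.List.pyIdx? xs.length i = none) : PySem.List.pySetD xs i v = xs := by
  simp [PySem.List.pySetD, PySem.List.pySet?, h]

-- A's -1/1 visited array as the image of a boolean visited array --------------
def pvVOf (s : List Bool) : List Int := s.map (fun b => if b then 1 else -1)

theorem pvVOf_length (s : List Bool) : (pvVOf s).length = s.length := by simp [pvVOf]

theorem pvVOf_setD (s : List Bool) (i : Int) :
    PySem.List.pySetD (pvVOf s) i 1 = pvVOf (PySem.List.pySetD s i true) := by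
  cases h : PySem.List.pyIdx? s.length i with
  | none =>
    rw [pvSetD_none _ _ _ (by rw [pvVOf_length]; exact h), pvSetD_none _ _ _ h]
  | some k =>
    rw [pvSetD_k _ _ _ k (by rw [pvVOf_length]; exact h), pvSetD_k _ _ _ k h]
    simp [pvVOf, List.map_set]

theorem pvVOf_getD_one_iff (s : List Bool) (i : Int) :
    (PySem.List.pyGetD (pvVOf s) i 0 = 1) ↔ (PySem.List.pyGetD s i false = true) := by
  cases h : PySem.List.pyIdx? s.length i with
  | none =>
    rw [pvGetD_none _ _ _ (by rw [pvVOf_length]; exact h), pvGetD_none _ _ _ h]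
    simp
  | some k =>
    have hk := pvIdx_lt h
    rw [pvGetD_k _ _ _ k (by rw [pvVOf_length]; exact h), pvGetD_k _ _ _ k h]
    rw [List.getD_eq_getElem _ _ (by rw [pvVOf_length]; exact hk), List.getD_eq_getElem _ _ hk]
    simp only [pvVOf, List.getElem_map]
    cases s[k] <;> simp

theorem pvVOf_getD_negone_iff (s : List Bool) (i : Int) (hi : PySem.Raise.InRange s.length i) :
    (PySem.List.pyGetD (pvVOf s) i 0 = -1) ↔ (PySem.List.pyGetD s i false = false) := by
  obtain ⟨k, h⟩ := pvIdx_some hi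
  have hk := pvIdx_lt h
  rw [pvGetD_k _ _ _ k (by rw [pvVOf_length]; exact h), pvGetD_k _ _ _ k h]
  rw [List.getD_eq_getElem _ _ (by rw [pvVOf_length]; exact hk), List.getD_eq_getElem _ _ hk]
  simp only [pvVOf, List.getElem_map]
  cases s[k] <;> simp

-- number of unmarked vertices -------------------------------------------------
def pvUnm (s : List Bool) : Nat := s.count false

theorem pvUnm_le_length (s : List Bool) : pvUnm s ≤ s.length := List.count_le_length

theorem pvUnm_set_le (s : List Bool) (i : Int) :
    pvUnm (PySem.List.pySetD s i true) ≤ pvUnm s := by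
  cases h : PySem.List.pyIdx? s.length i with
  | none => rw [pvSetD_none _ _ _ h]
  | some k =>
    have hk := pvIdx_lt h
    rw [pvSetD_k _ _ _ k h]
    unfold pvUnm
    rw [List.count_set hk]
    simp

theorem pvUnm_pos (s : List Bool) (i : Int) (hi : PySem.Raise.InRange s.length i)
    (hf : PySem.List.pyGetD s i false = false) : 1 ≤ pvUnm s := by
  have hmem := PySem.List.pyGetD_mem s (i := i) false hi
  rw [hf] at hmem
  exact List.count_pos_iff.mpr hmem

theorem pvUnm_set_eq (s : List Bool) (i : Int) (hi : PySem.Raise.InRange s.length i)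
    (hf : PySem.List.pyGetD s i false = false) :
    pvUnm (PySem.List.pySetD s i true) + 1 = pvUnm s := by
  obtain ⟨k, h⟩ := pvIdx_some hi
  have hk := pvIdx_lt h
  have hkv : s[k] = false := by
    have := pvGetD_k s i false k h
    rw [hf] at this
    rw [List.getD_eq_getElem _ _ hk] at this
    exact this.symm
  have hpos : 1 ≤ pvUnm s := pvUnm_pos s i hi hf
  rw [pvSetD_k _ _ _ k h]
  unfold pvUnm at *
  rw [List.count_set hk]
  simp [hkv]
  omega

theorem pvAllMarked_getD (s : List Bool) (i : Int) (h0 : pvUnm s = 0)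
    (hi : PySem.Raise.InRange s.length i) : PySem.List.pyGetD s i false = true := by
  have hmem := PySem.List.pyGetD_mem s (i := i) false hi
  cases hv : PySem.List.pyGetD s i false
  · rw [hv] at hmem
    have := List.count_pos_iff.mpr hmem
    unfold pvUnm at h0
    omega
  · rfl

theorem pvSet_self (s : List Bool) (u : Int) (hu : PySem.Raise.InRange s.length u) :
    PySem.List.pyGetD (PySem.List.pySetD s u true) u false = true := by
  obtain ⟨k, h⟩ := pvIdx_some hu
  have hk := pvIdx_lt h
  rw [pvSetD_k _ _ _ k h, pvGetD_k _ _ _ k (by rw [List.length_set]; exact h)]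
  rw [List.getD_eq_getElem _ _ (by rw [List.length_set]; exact hk)]
  simp

theorem pvSet_pt (s : List Bool) (i j : Int)
    (h : PySem.List.pyGetD s j false = true) :
    PySem.List.pyGetD (PySem.List.pySetD s i true) j false = true := by
  cases hi : PySem.List.pyIdx? s.length i with
  | none => rw [pvSetD_none _ _ _ hi]; exact h
  | some k =>
    have hk := pvIdx_lt hi
    rw [pvSetD_k _ _ _ k hi]
    cases hj : PySem.List.pyIdx? s.length j with
    | none => rw [pvGetD_none _ _ _ hj] at h; exact absurd h (by simp)
    | some kj =>
      have hkj := pvIdx_lt hj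
      rw [pvGetD_k _ _ _ kj hj, List.getD_eq_getElem _ _ hkj] at h
      rw [pvGetD_k _ _ _ kj (by rw [List.length_set]; exact hj)]
      rw [List.getD_eq_getElem _ _ (by rw [List.length_set]; exact hkj)]
      rw [List.getElem_set]
      split
      · rfl
      · exact h

-- shared core: the recursive marking machine on boolean arrays ---------------
mutual
def pvRecVisit (G : List (List Int)) (f : Nat) (u : Int) (s : List Bool) : List Bool :=
  match f with
  | 0 => s
  | f' + 1 => pvRecLoop G f' (PySem.List.pyGetD G u []) (PySem.List.pySetD s u true)
termination_by (f, 0)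

def pvRecLoop (G : List (List Int)) (f : Nat) (l : List Int) (s : List Bool) : List Bool :=
  match l with
  | [] => s
  | i :: rest =>
    if PySem.List.pyGetD s i false then pvRecLoop G f rest s
    else pvRecLoop G f rest (pvRecVisit G f i s)
termination_by (f, l.length + 1)
end

-- invariants: length preserved, unmarked count does not grow, marks are kept
theorem pvRecInv (G : List (List Int)) : ∀ f : Nat,
    (∀ u s, (pvRecVisit G f u s).length = s.length ∧ pvUnm (pvRecVisit G f u s) ≤ pvUnm s ∧
      ∀ j : Int, PySem.List.pyGetD s j false = true →
        PySem.List.pyGetD (pvRecVisit G f u s) j false = true) ∧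
    (∀ l s, (pvRecLoop G f l s).length = s.length ∧ pvUnm (pvRecLoop G f l s) ≤ pvUnm s ∧
      ∀ j : Int, PySem.List.pyGetD s j false = true →
        PySem.List.pyGetD (pvRecLoop G f l s) j false = true) := by
  intro f
  induction f with
  | zero =>
    have hV : ∀ (u : Int) (s : List Bool), (pvRecVisit G 0 u s).length = s.length ∧
        pvUnm (pvRecVisit G 0 u s) ≤ pvUnm s ∧
        ∀ j : Int, PySem.List.pyGetD s j false = true →
          PySem.List.pyGetD (pvRecVisit G 0 u s) j false = true := by
      intro u s; simp [pvRecVisit]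
    refine ⟨hV, ?_⟩
    intro l
    induction l with
    | nil => intro s; simp [pvRecLoop]
    | cons i rest ih =>
      intro s
      simp only [pvRecLoop]
      split
      · exact ih s
      · have h1 := hV i s
        have h2 := ih (pvRecVisit G 0 i s)
        exact ⟨by rw [h2.1, h1.1], le_trans h2.2.1 h1.2.1,
          fun j hj => h2.2.2 j (h1.2.2 j hj)⟩
  | succ f ih =>
    have hV : ∀ (u : Int) (s : List Bool), (pvRecVisit G (f+1) u s).length = s.length ∧
        pvUnm (pvRecVisit G (f+1) u s) ≤ pvUnm s ∧
        ∀ j : Int, PySem.List.pyGetD s j false = true →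
          PySem.List.pyGetD (pvRecVisit G (f+1) u s) j false = true := by
      intro u s
      simp only [pvRecVisit]
      have h1 := ih.2 (PySem.List.pyGetD G u []) (PySem.List.pySetD s u true)
      refine ⟨by rw [h1.1, PySem.List.length_pySetD], le_trans h1.2.1 (pvUnm_set_le s u), ?_⟩
      intro j hj
      exact h1.2.2 j (pvSet_pt s u j hj)
    refine ⟨hV, ?_⟩
    intro l
    induction l with
    | nil => intro s; simp [pvRecLoop]
    | cons i rest ihl =>
      intro s
      simp only [pvRecLoop]
      split
      · exact ihl s
      · have h1 := hV i s
        have h2 := ihl (pvRecVisit G (f+1) i s)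
        exact ⟨by rw [h2.1, h1.1], le_trans h2.2.1 h1.2.1,
          fun j hj => h2.2.2 j (h1.2.2 j hj)⟩

theorem pvRecVisit_marks_root (G : List (List Int)) (f : Nat) (u : Int) (s : List Bool)
    (hu : PySem.Raise.InRange s.length u) :
    PySem.List.pyGetD (pvRecVisit G (f+1) u s) u false = true := by
  simp only [pvRecVisit]
  exact ((pvRecInv G f).2 _ _).2.2 u (pvSet_self s u hu)

theorem pvAdjOk (G : List (List Int))
    (hG : ∀ row ∈ G, ∀ e ∈ row, PySem.Raise.InRange G.length e) (u : Int)
    (hu : PySem.Raise.InRange G.length u) :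
    ∀ e ∈ PySem.List.pyGetD G u [], PySem.Raise.InRange G.length e :=
  hG _ (PySem.List.pyGetD_mem G ([] : List Int) hu)

theorem pvLoopMarked (G : List (List Int)) (f : Nat) : ∀ (l : List Int) (s : List Bool),
    pvUnm s = 0 → s.length = G.length →
    (∀ e ∈ l, PySem.Raise.InRange G.length e) → pvRecLoop G f l s = s := by
  intro l
  induction l with
  | nil => intro s _ _ _; simp [pvRecLoop]
  | cons i rest ih =>
    intro s h0 hs hl
    have hg : PySem.List.pyGetD s i false = true :=
      pvAllMarked_getD s i h0 (hs ▸ hl i (List.mem_cons_self ..))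
    simp only [pvRecLoop, hg, if_true]
    exact ih s h0 hs (fun e he => hl e (List.mem_cons_of_mem _ he))

-- the result of the marking machine does not depend on the fuel, once the fuel
-- covers the number of unmarked vertices
theorem pvStab (G : List (List Int))
    (hG : ∀ row ∈ G, ∀ e ∈ row, PySem.Raise.InRange G.length e) : ∀ K : Nat,
    (∀ (s : List Bool) (u : Int) (f g : Nat), pvUnm s ≤ K → s.length = G.length →
      PySem.Raise.InRange G.length u → PySem.List.pyGetD s u false = false →
      pvUnm s ≤ f → pvUnm s ≤ g → pvRecVisit G f u s = pvRecVisit G g u s) ∧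
    (∀ (s : List Bool) (l : List Int) (f g : Nat), pvUnm s ≤ K → s.length = G.length →
      (∀ e ∈ l, PySem.Raise.InRange G.length e) →
      pvUnm s ≤ f → pvUnm s ≤ g → pvRecLoop G f l s = pvRecLoop G g l s) := by
  intro K
  induction K with
  | zero =>
    constructor
    · intro s u f g hK hs hu hmk _ _
      have := pvUnm_pos s u (hs ▸ hu) hmk
      omega
    · intro s l f g hK hs hl _ _
      rw [pvLoopMarked G f l s (by omega) hs hl, pvLoopMarked G g l s (by omega) hs hl]
  | succ K ihK =>
    have hV : ∀ (s : List Bool) (u : Int) (f g : Nat), pvUnm s ≤ K + 1 → s.length = G.length →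
        PySem.Raise.InRange G.length u → PySem.List.pyGetD s u false = false →
        pvUnm s ≤ f → pvUnm s ≤ g → pvRecVisit G f u s = pvRecVisit G g u s := by
      intro s u f g hK hs hu hmk hf hg
      have hpos : 1 ≤ pvUnm s := pvUnm_pos s u (hs ▸ hu) hmk
      obtain ⟨f', rfl⟩ : ∃ f', f = f' + 1 := ⟨f - 1, by omega⟩
      obtain ⟨g', rfl⟩ : ∃ g', g = g' + 1 := ⟨g - 1, by omega⟩
      simp only [pvRecVisit]
      have hset := pvUnm_set_eq s u (hs ▸ hu) hmk
      exact ihK.2 _ _ f' g' (by omega)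
        (by rw [PySem.List.length_pySetD]; exact hs)
        (pvAdjOk G hG u hu) (by omega) (by omega)
    refine ⟨hV, ?_⟩
    intro s l
    induction l generalizing s with
    | nil => intro f g _ _ _ _ _; simp [pvRecLoop]
    | cons i rest ihl =>
      intro f g hK hs hl hf hg
      have hi : PySem.Raise.InRange G.length i := hl i (List.mem_cons_self ..)
      have hrest : ∀ e ∈ rest, PySem.Raise.InRange G.length e :=
        fun e he => hl e (List.mem_cons_of_mem _ he)
      simp only [pvRecLoop]
      split
      · exact ihl s f g hK hs hrest hf hg
      · rename_i hmk
        have hmk' : PySem.List.pyGetD s i false = false := by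
          cases h : PySem.List.pyGetD s i false
          · rfl
          · exact absurd h hmk
        have hpos : 1 ≤ pvUnm s := pvUnm_pos s i (hs ▸ hi) hmk'
        rw [show pvRecVisit G g i s = pvRecVisit G f i s from
          (hV s i g f hK hs hi hmk' hg hf)]
        obtain ⟨f', rfl⟩ : ∃ f', f = f' + 1 := ⟨f - 1, by omega⟩
        have hset := pvUnm_set_eq s i (hs ▸ hi) hmk'
        have hinv := (pvRecInv G f').2 (PySem.List.pyGetD G i []) (PySem.List.pySetD s i true)
        have hsmall : pvUnm (pvRecVisit G (f'+1) i s) ≤ pvUnm s - 1 := by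
          simp only [pvRecVisit]
          have := pvUnm_set_le s i
          omega
        have hlen : (pvRecVisit G (f'+1) i s).length = G.length := by
          rw [((pvRecInv G (f'+1)).1 i s).1]; exact hs
        exact ihK.2 _ rest (f'+1) g (by omega) hlen hrest (by omega) (by omega)

theorem pvRecLoop_append (G : List (List Int)) (f : Nat) : ∀ (xs ys : List Int) (s : List Bool),
    pvRecLoop G f (xs ++ ys) s = pvRecLoop G f ys (pvRecLoop G f xs s) := by
  intro xs
  induction xs with
  | nil => intro ys s; simp [pvRecLoop]
  | cons i rest ih =>
    intro ys s
    simp only [List.cons_append, pvRecLoop]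
    split
    · exact ih ys s
    · exact ih ys _

-- A's TpK pass: the visited-array component is the boolean marking machine
theorem pvProjTpK (G : List (List Int)) : ∀ f : Nat,
    (∀ (u : Int) (s : List Bool) (d : List Int),
      (pvVisitTpK G f u (pvVOf s) d).2 = pvVOf (pvRecVisit G f u s)) ∧
    (∀ (l : List Int) (s : List Bool) (d : List Int),
      (pvLoopTpK G f l (pvVOf s) d).2 = pvVOf (pvRecLoop G f l s)) := by
  intro f
  induction f with
  | zero =>
    have hV : ∀ (u : Int) (s : List Bool) (d : List Int),
        (pvVisitTpK G 0 u (pvVOf s) d).2 = pvVOf (pvRecVisit G 0 u s) := by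
      intro u s d; simp [pvVisitTpK, pvRecVisit]
    refine ⟨hV, ?_⟩
    intro l
    induction l with
    | nil => intro s d; simp [pvLoopTpK, pvRecLoop]
    | cons i rest ihl =>
      intro s d
      simp only [pvLoopTpK, pvRecLoop]
      by_cases hm : PySem.List.pyGetD s i false = true
      · rw [if_neg (by simp [(pvVOf_getD_one_iff s i).mpr hm]), if_pos hm]
        exact ihl s d
      · have hm' : PySem.List.pyGetD s i false = false := by
          cases h : PySem.List.pyGetD s i false
          · rfl
          · exact absurd h hm
        rw [if_pos (fun h => hm ((pvVOf_getD_one_iff s i).mp h)), hm']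
        simp only [Bool.false_eq_true, if_false]
        have h1 := hV i s d
        rw [show (pvVisitTpK G 0 i (pvVOf s) d).2 = pvVOf (pvRecVisit G 0 i s) from h1]
        exact ihl (pvRecVisit G 0 i s) _
  | succ f ih =>
    have hV : ∀ (u : Int) (s : List Bool) (d : List Int),
        (pvVisitTpK G (f+1) u (pvVOf s) d).2 = pvVOf (pvRecVisit G (f+1) u s) := by
      intro u s d
      simp only [pvVisitTpK, pvRecVisit]
      rw [pvVOf_setD]
      exact ih.2 _ _ d
    refine ⟨hV, ?_⟩
    intro l
    induction l with
    | nil => intro s d; simp [pvLoopTpK, pvRecLoop]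
    | cons i rest ihl =>
      intro s d
      simp only [pvLoopTpK, pvRecLoop]
      by_cases hm : PySem.List.pyGetD s i false = true
      · rw [if_neg (by simp [(pvVOf_getD_one_iff s i).mpr hm]), if_pos hm]
        exact ihl s d
      · have hm' : PySem.List.pyGetD s i false = false := by
          cases h : PySem.List.pyGetD s i false
          · rfl
          · exact absurd h hm
        rw [if_pos (fun h => hm ((pvVOf_getD_one_iff s i).mp h)), hm']
        simp only [Bool.false_eq_true, if_false]
        rw [show (pvVisitTpK G (f+1) i (pvVOf s) d).2 = pvVOf (pvRecVisit G (f+1) i s) from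
          hV i s d]
        exact ihl (pvRecVisit G (f+1) i s) _

-- A's TpK pass only appends to the delete list; a positive-fuel visit ends with its root
theorem pvDelTpK (G : List (List Int)) : ∀ f : Nat,
    (∀ (u : Int) (v d : List Int), ∃ t, (pvVisitTpK G f u v d).1 = d ++ t) ∧
    (∀ (l : List Int) (v d : List Int), ∃ t, (pvLoopTpK G f l v d).1 = d ++ t) := by
  intro f
  induction f with
  | zero =>
    have hV : ∀ (u : Int) (v d : List Int), ∃ t, (pvVisitTpK G 0 u v d).1 = d ++ t := by
      intro u v d; exact ⟨[], by simp [pvVisitTpK]⟩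
    refine ⟨hV, ?_⟩
    intro l
    induction l with
    | nil => intro v d; exact ⟨[], by simp [pvLoopTpK]⟩
    | cons i rest ihl =>
      intro v d
      simp only [pvLoopTpK]
      split
      · obtain ⟨t1, h1⟩ := hV i v d
        obtain ⟨t2, h2⟩ := ihl (pvVisitTpK G 0 i v d).2 (pvVisitTpK G 0 i v d).1
        exact ⟨t1 ++ t2, by rw [h2, h1, List.append_assoc]⟩
      · exact ihl v d
  | succ f ih =>
    have hV : ∀ (u : Int) (v d : List Int), ∃ t, (pvVisitTpK G (f+1) u v d).1 = d ++ t := by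
      intro u v d
      simp only [pvVisitTpK]
      obtain ⟨t, ht⟩ := ih.2 (PySem.List.pyGetD G u []) (PySem.List.pySetD v u 1) d
      exact ⟨t ++ [u], by rw [ht, List.append_assoc]⟩
    refine ⟨hV, ?_⟩
    intro l
    induction l with
    | nil => intro v d; exact ⟨[], by simp [pvLoopTpK]⟩
    | cons i rest ihl =>
      intro v d
      simp only [pvLoopTpK]
      split
      · obtain ⟨t1, h1⟩ := hV i v d
        obtain ⟨t2, h2⟩ := ihl (pvVisitTpK G (f+1) i v d).2 (pvVisitTpK G (f+1) i v d).1
        exact ⟨t1 ++ t2, by rw [h2, h1, List.append_assoc]⟩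
      · exact ihl v d

theorem pvDelTpK_last (G : List (List Int)) (f : Nat) (u : Int) (v d : List Int) :
    ∃ t, (pvVisitTpK G (f+1) u v d).1 = d ++ t ++ [u] := by
  simp only [pvVisitTpK]
  obtain ⟨t, ht⟩ := (pvDelTpK G f).2 (PySem.List.pyGetD G u []) (PySem.List.pySetD v u 1) d
  exact ⟨t, by rw [ht]⟩

-- A's K pass: the visited-array component is the same boolean marking machine
theorem pvProjK (G : List (List Int)) : ∀ f : Nat,
    (∀ (u : Int) (s : List Bool) (p : List Int),
      (pvVisitK G f u (pvVOf s) p).1 = pvVOf (pvRecVisit G f u s)) ∧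
    (∀ (w : Int) (l : List Int) (s : List Bool) (p : List Int),
      (pvLoopK G f w l (pvVOf s) p).1 = pvVOf (pvRecLoop G f l s)) := by
  intro f
  induction f with
  | zero =>
    have hV : ∀ (u : Int) (s : List Bool) (p : List Int),
        (pvVisitK G 0 u (pvVOf s) p).1 = pvVOf (pvRecVisit G 0 u s) := by
      intro u s p; simp [pvVisitK, pvRecVisit]
    refine ⟨hV, ?_⟩
    intro w l
    induction l with
    | nil => intro s p; simp [pvLoopK, pvRecLoop]
    | cons i rest ihl =>
      intro s p
      simp only [pvLoopK, pvRecLoop]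
      by_cases hm : PySem.List.pyGetD s i false = true
      · rw [if_neg (by simp [(pvVOf_getD_one_iff s i).mpr hm]), if_pos hm]
        exact ihl s p
      · have hm' : PySem.List.pyGetD s i false = false := by
          cases h : PySem.List.pyGetD s i false
          · rfl
          · exact absurd h hm
        rw [if_pos (fun h => hm ((pvVOf_getD_one_iff s i).mp h)), hm']
        simp only [Bool.false_eq_true, if_false]
        rw [show (pvVisitK G 0 i (pvVOf s) (PySem.List.pySetD p i w)).1 =
          pvVOf (pvRecVisit G 0 i s) from hV i s _]
        exact ihl (pvRecVisit G 0 i s) _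
  | succ f ih =>
    have hV : ∀ (u : Int) (s : List Bool) (p : List Int),
        (pvVisitK G (f+1) u (pvVOf s) p).1 = pvVOf (pvRecVisit G (f+1) u s) := by
      intro u s p
      simp only [pvVisitK, pvRecVisit]
      rw [pvVOf_setD]
      exact ih.2 u _ _ p
    refine ⟨hV, ?_⟩
    intro w l
    induction l with
    | nil => intro s p; simp [pvLoopK, pvRecLoop]
    | cons i rest ihl =>
      intro s p
      simp only [pvLoopK, pvRecLoop]
      by_cases hm : PySem.List.pyGetD s i false = true
      · rw [if_neg (by simp [(pvVOf_getD_one_iff s i).mpr hm]), if_pos hm]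
        exact ihl s p
      · have hm' : PySem.List.pyGetD s i false = false := by
          cases h : PySem.List.pyGetD s i false
          · rfl
          · exact absurd h hm
        rw [if_pos (fun h => hm ((pvVOf_getD_one_iff s i).mp h)), hm']
        simp only [Bool.false_eq_true, if_false]
        rw [show (pvVisitK G (f+1) i (pvVOf s) (PySem.List.pySetD p i w)).1 =
          pvVOf (pvRecVisit G (f+1) i s) from hV i s _]
        exact ihl (pvRecVisit G (f+1) i s) _

-- explicit branch equations for B's stack machine
theorem pvFillB_nil (G : List (List Int)) (f : Nat) (s : List Bool) :
    pvFillB G f [] s = s := by rw [pvFillB.eq_def]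

theorem pvFillB_cons_marked (G : List (List Int)) (f : Nat) (u : Int) (rest : List Int)
    (s : List Bool) (h : PySem.List.pyGetD s u false = true) :
    pvFillB G f (u :: rest) s = pvFillB G f rest s := by
  rw [pvFillB.eq_def]; simp only []; rw [if_pos h]

theorem pvFillB_cons_new (G : List (List Int)) (f : Nat) (u : Int) (rest : List Int)
    (s : List Bool) (h : PySem.List.pyGetD s u false = false) :
    pvFillB G (f + 1) (u :: rest) s =
      pvFillB G f (PySem.List.pyGetD G u [] ++ rest) (PySem.List.pySetD s u true) := by
  rw [pvFillB.eq_def]; simp only []; rw [if_neg (by simp [h])]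

theorem pvFillMarked (G : List (List Int)) (f : Nat) : ∀ (st : List Int) (s : List Bool),
    pvUnm s = 0 → s.length = G.length →
    (∀ e ∈ st, PySem.Raise.InRange G.length e) → pvFillB G f st s = s := by
  intro st
  induction st with
  | nil => intro s _ _ _; simp [pvFillB]
  | cons u rest ih =>
    intro s h0 hs hst
    have hg : PySem.List.pyGetD s u false = true :=
      pvAllMarked_getD s u h0 (hs ▸ hst u (List.mem_cons_self ..))
    rw [pvFillB_cons_marked G f u rest s hg]
    exact ih s h0 hs (fun e he => hst e (List.mem_cons_of_mem _ he))

-- B's stack machine does not depend on the fuel either, once it covers the unmarked count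
theorem pvFillStab (G : List (List Int))
    (hG : ∀ row ∈ G, ∀ e ∈ row, PySem.Raise.InRange G.length e) : ∀ K : Nat,
    ∀ (st : List Int) (s : List Bool) (f g : Nat), pvUnm s ≤ K → s.length = G.length →
      (∀ e ∈ st, PySem.Raise.InRange G.length e) →
      pvUnm s ≤ f → pvUnm s ≤ g → pvFillB G f st s = pvFillB G g st s := by
  intro K
  induction K with
  | zero =>
    intro st s f g hK hs hst _ _
    rw [pvFillMarked G f st s (by omega) hs hst, pvFillMarked G g st s (by omega) hs hst]
  | succ K ihK =>
    intro st
    induction st with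
    | nil => intro s f g _ _ _ _ _; rw [pvFillB_nil, pvFillB_nil]
    | cons u rest ihl =>
      intro s f g hK hs hst hf hg
      have hu : PySem.Raise.InRange G.length u := hst u (List.mem_cons_self ..)
      have hrest : ∀ e ∈ rest, PySem.Raise.InRange G.length e :=
        fun e he => hst e (List.mem_cons_of_mem _ he)
      by_cases hm : PySem.List.pyGetD s u false = true
      · rw [pvFillB_cons_marked G _ u rest s hm, pvFillB_cons_marked G _ u rest s hm]
        exact ihl s f g hK hs hrest hf hg
      · have hmk : PySem.List.pyGetD s u false = false := by
          cases h : PySem.List.pyGetD s u false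
          · rfl
          · exact absurd h hm
        have hpos : 1 ≤ pvUnm s := pvUnm_pos s u (hs ▸ hu) hmk
        obtain ⟨f', rfl⟩ : ∃ f', f = f' + 1 := ⟨f - 1, by omega⟩
        obtain ⟨g', rfl⟩ : ∃ g', g = g' + 1 := ⟨g - 1, by omega⟩
        rw [pvFillB_cons_new G f' u rest s hmk, pvFillB_cons_new G g' u rest s hmk]
        have hset := pvUnm_set_eq s u (hs ▸ hu) hmk
        exact ihK (PySem.List.pyGetD G u [] ++ rest) _ f' g' (by omega)
          (by rw [PySem.List.length_pySetD]; exact hs)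
          (by intro e he
              rcases List.mem_append.mp he with h | h
              · exact pvAdjOk G hG u hu e h
              · exact hrest e h)
          (by omega) (by omega)

-- simulation: running B's stack machine on l ++ ws first runs the recursive marking
-- machine on l, then continues with ws
theorem pvSimFill (G : List (List Int))
    (hG : ∀ row ∈ G, ∀ e ∈ row, PySem.Raise.InRange G.length e) : ∀ K : Nat,
    ∀ (l ws : List Int) (s : List Bool) (f : Nat), pvUnm s ≤ K → pvUnm s ≤ f →
      s.length = G.length →
      (∀ e ∈ l, PySem.Raise.InRange G.length e) →
      (∀ e ∈ ws, PySem.Raise.InRange G.length e) →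
      pvFillB G f (l ++ ws) s =
        pvFillB G (pvUnm (pvRecLoop G (pvUnm s) l s)) ws (pvRecLoop G (pvUnm s) l s) := by
  intro K
  induction K with
  | zero =>
    intro l ws s f hK hf hs hl hws
    have h0 : pvUnm s = 0 := by omega
    rw [pvLoopMarked G (pvUnm s) l s h0 hs hl]
    rw [pvFillMarked G f (l ++ ws) s h0 hs
      (by intro e he; rcases List.mem_append.mp he with h | h
          · exact hl e h
          · exact hws e h)]
    rw [pvFillMarked G (pvUnm s) ws s h0 hs hws]
  | succ K ihK =>
    intro l
    induction l with
    | nil =>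
      intro ws s f hK hf hs _ hws
      simp only [List.nil_append, pvRecLoop]
      exact pvFillStab G hG (pvUnm s) ws s f (pvUnm s) le_rfl hs hws hf le_rfl
    | cons u rest ihl =>
      intro ws s f hK hf hs hl hws
      have hu : PySem.Raise.InRange G.length u := hl u (List.mem_cons_self ..)
      have hrest : ∀ e ∈ rest, PySem.Raise.InRange G.length e :=
        fun e he => hl e (List.mem_cons_of_mem _ he)
      by_cases hm : PySem.List.pyGetD s u false = true
      · rw [List.cons_append, pvFillB_cons_marked G f u (rest ++ ws) s hm]
        conv_rhs => rw [pvRecLoop]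
        rw [if_pos hm]
        exact ihl ws s f hK hf hs hrest hws
      · have hmk : PySem.List.pyGetD s u false = false := by
          cases h : PySem.List.pyGetD s u false
          · rfl
          · exact absurd h hm
        have hpos : 1 ≤ pvUnm s := pvUnm_pos s u (hs ▸ hu) hmk
        obtain ⟨f', rfl⟩ : ∃ f', f = f' + 1 := ⟨f - 1, by omega⟩
        rw [List.cons_append, pvFillB_cons_new G f' u (rest ++ ws) s hmk]
        conv_rhs => rw [pvRecLoop]
        rw [if_neg hm]
        have hset := pvUnm_set_eq s u (hs ▸ hu) hmk
        set s1 := PySem.List.pySetD s u true with hs1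
        have hlen1 : s1.length = G.length := by rw [hs1, PySem.List.length_pySetD]; exact hs
        have hadj : ∀ e ∈ PySem.List.pyGetD G u [], PySem.Raise.InRange G.length e :=
          pvAdjOk G hG u hu
        have hstep := ihK (PySem.List.pyGetD G u [] ++ rest) ws s1 f' (by omega) (by omega)
          hlen1
          (by intro e he; rcases List.mem_append.mp he with h | h
              · exact hadj e h
              · exact hrest e h)
          hws
        rw [List.append_assoc] at hstep
        rw [hstep]
        -- identify the two final states
        obtain ⟨m, hmeq⟩ : ∃ m, pvUnm s = m + 1 := ⟨pvUnm s - 1, by omega⟩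
        have hm1 : pvUnm s1 = m := by omega
        have hsplit := pvRecLoop_append G (pvUnm s1) (PySem.List.pyGetD G u []) rest s1
        set s2 := pvRecLoop G (pvUnm s1) (PySem.List.pyGetD G u []) s1 with hs2
        have hlen2 : s2.length = G.length := by
          rw [hs2, ((pvRecInv G (pvUnm s1)).2 _ _).1]; exact hlen1
        have hunm2 : pvUnm s2 ≤ pvUnm s1 := ((pvRecInv G (pvUnm s1)).2 _ _).2.1
        have hstab : pvRecLoop G (pvUnm s1) rest s2 = pvRecLoop G (pvUnm s) rest s2 :=
          (pvStab G hG (pvUnm s2)).2 s2 rest (pvUnm s1) (pvUnm s) le_rfl hlen2 hrest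
            (by omega) (by omega)
        have hvisit : pvRecVisit G (pvUnm s) u s = s2 := by
          rw [hmeq]
          simp only [pvRecVisit]
          rw [hs2, hm1, hs1]
        rw [hsplit, hstab, hvisit]

theorem pvFill_root (G : List (List Int))
    (hG : ∀ row ∈ G, ∀ e ∈ row, PySem.Raise.InRange G.length e) (u : Int) (s : List Bool)
    (f g : Nat) (hu : PySem.Raise.InRange G.length u)
    (hmk : PySem.List.pyGetD s u false = false) (hs : s.length = G.length)
    (hf : pvUnm s ≤ f) (hg : pvUnm s ≤ g) :
    pvFillB G f [u] s = pvRecVisit G g u s := by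
  have hsim := pvSimFill G hG (pvUnm s) [u] [] s f le_rfl hf hs
    (by intro e he; rw [List.mem_singleton] at he; exact he ▸ hu)
    (by intro e he; exact absurd he (List.not_mem_nil))
  rw [List.append_nil] at hsim
  rw [hsim, pvFillB_nil]
  have hloop : pvRecLoop G (pvUnm s) [u] s = pvRecVisit G (pvUnm s) u s := by
    rw [pvRecLoop, if_neg (by simp [hmk]), pvRecLoop]
  rw [hloop]
  exact (pvStab G hG (pvUnm s)).1 s u (pvUnm s) g le_rfl hs hu hmk le_rfl hg

-- the advance loop of DFS_TpK: lands on the first unvisited index (or n)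
theorem pvAdvSpec (n : Nat) (v : List Int) : ∀ (g i : Nat), n - i ≤ g → i ≤ n →
    i ≤ pvAdvTpK n v g i ∧ pvAdvTpK n v g i ≤ n ∧
    (∀ m : Nat, i ≤ m → m < pvAdvTpK n v g i → PySem.List.pyGetD v (m : Int) 0 ≠ -1) ∧
    (pvAdvTpK n v g i = n ∨ PySem.List.pyGetD v ((pvAdvTpK n v g i : Nat) : Int) 0 = -1) := by
  intro g
  induction g with
  | zero =>
    intro i hg hi
    have : i = n := by omega
    simp only [pvAdvTpK]
    exact ⟨le_rfl, hi, fun m h1 h2 => absurd (lt_of_le_of_lt h1 h2) (lt_irrefl i), Or.inl this⟩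
  | succ g ih =>
    intro i hg hi
    simp only [pvAdvTpK]
    split
    · rename_i hcond
      have hin : i < n := lt_of_le_of_ne hi hcond.1
      obtain ⟨h1, h2, h3, h4⟩ := ih (i + 1) (by omega) (by omega)
      refine ⟨by omega, h2, ?_, h4⟩
      intro m hm1 hm2
      rcases Nat.eq_or_lt_of_le hm1 with rfl | hlt
      · exact hcond.2
      · exact h3 m hlt hm2
    · rename_i hcond
      refine ⟨le_rfl, hi, fun m h1 h2 => absurd (lt_of_le_of_lt h1 h2) (lt_irrefl i), ?_⟩
      by_cases hn : i = n
      · exact Or.inl hn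
      · cases not_and_or.mp hcond with
        | inl h => exact absurd (not_not.mp h) hn
        | inr h => exact Or.inr (not_not.mp h)

-- B's restart scan skips over already-marked indices one at a time
theorem pvSkip (G : List (List Int)) (n : Nat) (seen : List Bool) (s0 : Int) :
    ∀ (K i j : Nat), j - i ≤ K → i ≤ j → j ≤ n →
    (∀ m : Nat, i ≤ m → m < j → PySem.List.pyGetD seen (m : Int) false = true) →
    pvLoopRootB G (List.range' i (n - i)) s0 seen =
      pvLoopRootB G (List.range' j (n - j)) s0 seen := by
  intro K
  induction K with
  | zero =>
    intro i j h1 h2 _ _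
    have : i = j := by omega
    rw [this]
  | succ K ih =>
    intro i j h1 h2 h3 hm
    by_cases hij : i = j
    · rw [hij]
    · have hin : i < n := by omega
      rw [show n - i = (n - (i + 1)) + 1 from by omega, List.range'_succ]
      simp only [pvLoopRootB]
      rw [if_pos (hm i le_rfl (by omega))]
      exact ih (i + 1) j (by omega) (by omega) h3 (fun m hm1 hm2 => hm m (by omega) hm2)

-- the tracked restart root stays a vertex index below n
theorem pvRootRange (G : List (List Int)) (n : Nat) : ∀ (l : List Nat) (s0 : Int)
    (seen : List Bool), (∀ m ∈ l, m < n) → (∃ r : Nat, s0 = (r : Int) ∧ r < n) →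
    ∃ r : Nat, (pvLoopRootB G l s0 seen).1 = (r : Int) ∧ r < n := by
  intro l
  induction l with
  | nil => intro s0 seen _ h0; exact h0
  | cons i rest ih =>
    intro s0 seen hl h0
    simp only [pvLoopRootB]
    split
    · exact ih s0 seen (fun m hm => hl m (List.mem_cons_of_mem _ hm)) h0
    · exact ih _ _ (fun m hm => hl m (List.mem_cons_of_mem _ hm))
        ⟨i, rfl, hl i (List.mem_cons_self ..)⟩

-- outer restart loop: A's delete list ends with the root of the last restart,
-- which is exactly the root B tracks
theorem pvOutEq (G : List (List Int))
    (hG : ∀ row ∈ G, ∀ e ∈ row, PySem.Raise.InRange G.length e) :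
    ∀ (g i : Nat) (seen : List Bool) (d : List Int) (s0 : Int),
    G.length - i + 1 ≤ g → i ≤ G.length → seen.length = G.length →
    (i = G.length ∨ PySem.List.pyGetD seen (i : Int) false = false) →
    ∃ t, (pvOuterTpK G G.length g i (pvVOf seen) d).1 = d ++ t ∧
      (if i = G.length then t = [] else t ≠ [] ∧
        t.getLast? = some ((pvLoopRootB G (List.range' i (G.length - i)) s0 seen).1)) := by
  intro g
  induction g with
  | zero => intro i seen d s0 hg _ _ _; omega
  | succ g ih =>
    intro i seen d s0 hg hi hlen hstart
    simp only [pvOuterTpK]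
    by_cases hin : i = G.length
    · refine ⟨[], by simp [hin], ?_⟩
      rw [if_pos hin]
    · rw [if_neg hin]
      have hiln : i < G.length := lt_of_le_of_ne hi hin
      have hseen_i : PySem.List.pyGetD seen (i : Int) false = false := hstart.resolve_left hin
      have hiRange : PySem.Raise.InRange G.length (i : Int) := ⟨by omega, by exact_mod_cast hiln⟩
      obtain ⟨t1, ht1⟩ : ∃ t1, (pvVisitTpK G G.length (i : Int) (pvVOf seen) d).1 =
          d ++ t1 ++ [(i : Int)] := by
        obtain ⟨m, hm⟩ : ∃ m, G.length = m + 1 := ⟨G.length - 1, by omega⟩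
        rw [hm]; exact pvDelTpK_last G m _ _ _
      have hproj : (pvVisitTpK G G.length (i : Int) (pvVOf seen) d).2 =
          pvVOf (pvRecVisit G G.length (i : Int) seen) := (pvProjTpK G G.length).1 _ _ _
      set seen' := pvRecVisit G G.length (i : Int) seen with hseen'
      have hlen' : seen'.length = G.length := by
        rw [hseen', ((pvRecInv G G.length).1 _ _).1]; exact hlen
      have hrooti : PySem.List.pyGetD seen' (i : Int) false = true := by
        obtain ⟨m, hm⟩ : ∃ m, G.length = m + 1 := ⟨G.length - 1, by omega⟩
        rw [hseen', hm]
        exact pvRecVisit_marks_root G m (i : Int) seen (hlen ▸ hiRange)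
      rw [hproj]
      obtain ⟨hj1, hj2, hj3, hj4⟩ :=
        pvAdvSpec G.length (pvVOf seen') (G.length - i) i le_rfl hi
      set j := pvAdvTpK G.length (pvVOf seen') (G.length - i) i with hj
      have hij : i < j := by
        rcases Nat.eq_or_lt_of_le hj1 with heq | h
        · exfalso
          rcases hj4 with h4 | h4
          · exact hin (heq.trans h4)
          · rw [← heq] at h4
            have := (pvVOf_getD_negone_iff seen' (i : Int) (hlen' ▸ hiRange)).mp h4
            rw [hrooti] at this
            exact Bool.true_eq_false.mp this
        · exact h
      have hstart' : j = G.length ∨ PySem.List.pyGetD seen' (j : Int) false = false := by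
        rcases hj4 with h4 | h4
        · exact Or.inl h4
        · by_cases hjn : j = G.length
          · exact Or.inl hjn
          · have hjRange : PySem.Raise.InRange G.length (j : Int) :=
              ⟨by omega, by exact_mod_cast lt_of_le_of_ne hj2 hjn⟩
            exact Or.inr ((pvVOf_getD_negone_iff seen' (j : Int) (hlen' ▸ hjRange)).mp h4)
      obtain ⟨t2, ht2, hcond2⟩ := ih j seen' (pvVisitTpK G G.length (i : Int) (pvVOf seen) d).1
        (i : Int) (by omega) hj2 hlen' hstart'
      refine ⟨t1 ++ [(i : Int)] ++ t2, ?_, ?_⟩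
      · rw [ht2, ht1]
        simp [List.append_assoc]
      · rw [if_neg hin]
        refine ⟨by simp, ?_⟩
        rw [show G.length - i = (G.length - (i + 1)) + 1 from by omega, List.range'_succ]
        simp only [pvLoopRootB]
        rw [if_neg (by simp [hseen_i])]
        have hfill : pvFillB G G.length [(i : Int)] seen = seen' := by
          rw [hseen']
          exact pvFill_root G hG (i : Int) seen G.length G.length hiRange hseen_i hlen
            (hlen ▸ pvUnm_le_length seen) (hlen ▸ pvUnm_le_length seen)
        rw [hfill]
        have hskip := pvSkip G G.length seen' (i : Int) (j - (i + 1)) (i + 1) j le_rfl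
          (by omega) hj2
          (by intro m hm1 hm2
              have hmRange : PySem.Raise.InRange G.length (m : Int) :=
                ⟨by omega, by exact_mod_cast (by omega : m < G.length)⟩
              have hne := hj3 m (by omega) hm2
              cases hv : PySem.List.pyGetD seen' (m : Int) false
              · exact absurd ((pvVOf_getD_negone_iff seen' (m : Int)
                  (hlen' ▸ hmRange)).mpr hv) hne
              · rfl)
        rw [hskip]
        by_cases hjn : j = G.length
        · rw [if_pos hjn] at hcond2
          rw [hcond2, hjn]
          simp [pvLoopRootB]
        · rw [if_neg hjn] at hcond2
          obtain ⟨hne2, hlast2⟩ := hcond2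
          rw [List.append_assoc, List.getLast?_append, List.getLast?_append, hlast2]
          rfl

theorem pvGetD_replicate_false (n : Nat) (i : Int) :
    PySem.List.pyGetD (List.replicate n false) i false = false := by
  cases h : PySem.List.pyIdx? (List.replicate n false).length i with
  | none => exact pvGetD_none _ _ _ h
  | some k =>
    rw [pvGetD_k _ _ _ k h]
    have hk := pvIdx_lt h
    rw [List.getD_eq_getElem _ _ hk]
    simp

theorem pvVOf_replicate (n : Nat) :
    List.replicate n (-1 : Int) = pvVOf (List.replicate n false) := by
  simp [pvVOf]

theorem pvAll_vOf (X : List Bool) :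
    (pvVOf X).all (fun i => !(i == -1)) = X.all id := by
  induction X with
  | nil => rfl
  | cons b rest ih =>
    have hc : pvVOf (b :: rest) = (if b then (1 : Int) else -1) :: pvVOf rest := rfl
    rw [hc, List.all_cons, List.all_cons, ih]
    cases b <;> rfl

-- ===== VERDICT (by name: the statement is the Claim_ definition above) =====
theorem the_good_start_spec : Claim_equal_the_good_start := by
  intro G _hDom hPre
  obtain ⟨hne, hG⟩ := hPre
  have hn1 : 0 < G.length := List.length_pos_iff.mpr hne
  unfold Spec_the_good_start
  obtain ⟨t, ht, hcond⟩ := pvOutEq G hG (G.length + 1) 0 (List.replicate G.length false) [] 0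
    (by omega) (by omega) (by simp) (Or.inr (pvGetD_replicate_false _ _))
  rw [if_neg (by omega)] at hcond
  obtain ⟨htne, hlast⟩ := hcond
  set rootB := (pvLoopRootB G (List.range' 0 (G.length - 0)) 0
    (List.replicate G.length false)).1 with hrootB
  obtain ⟨t0, ht0⟩ := List.getLast?_eq_some_iff.mp hlast
  obtain ⟨rt, hrt, hrtlt⟩ := pvRootRange G G.length (List.range' 0 (G.length - 0)) 0
    (List.replicate G.length false)
    (by intro m hm; have := List.mem_range'_1.mp hm; omega) ⟨0, rfl, by omega⟩
  have hrange : List.range G.length = List.range' 0 (G.length - 0) := by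
    rw [Nat.sub_zero, List.range_eq_range']
  have hs_eq : PySem.List.pyGetD
      (pvOuterTpK G G.length (G.length + 1) 0 (List.replicate G.length (-1)) []).1.reverse
      0 0 = rootB := by
    rw [pvVOf_replicate, ht]
    simp only [List.nil_append]
    rw [ht0]
    simp [List.reverse_append, PySem.List.pyGetD_zero_cons]
  show (pvVisitK G G.length
      (PySem.List.pyGetD
        (pvOuterTpK G G.length (G.length + 1) 0 (List.replicate G.length (-1)) []).1.reverse
        0 0)
      (List.replicate G.length (-1)) (List.replicate G.length (-1))).1.all
        (fun i => !(i == -1)) =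
    (pvFillB G G.length
      [(pvLoopRootB G (List.range G.length) 0 (List.replicate G.length false)).1]
      (List.replicate G.length false)).all id
  rw [hs_eq, hrange]
  rw [hrootB, hrt]
  have hrtRange : PySem.Raise.InRange G.length ((rt : Nat) : Int) :=
    ⟨by omega, by exact_mod_cast hrtlt⟩
  have hfillB : pvFillB G G.length [((rt : Nat) : Int)] (List.replicate G.length false) =
      pvRecVisit G G.length ((rt : Nat) : Int) (List.replicate G.length false) :=
    pvFill_root G hG _ _ _ _ hrtRange (pvGetD_replicate_false _ _) (by simp)
      (by have := pvUnm_le_length (List.replicate G.length false); simpa using this)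
      (by have := pvUnm_le_length (List.replicate G.length false); simpa using this)
  rw [hfillB, pvVOf_replicate]
  rw [(pvProjK G G.length).1 ((rt : Nat) : Int) (List.replicate G.length false) _]
  exact pvAll_vOf _
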